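-- pv_equiv track=rewrite | github.com/kahosato/sentiment_analysis | src/tokeniser.py | __split_with_punctuation
-- ===== SOURCE A (Python) =====
-- def __split_with_punctuation(to_split, punc):
--     # a/b -> a, /, b
--     # /a -> /, a
--     # a/ -> a, /
--     # assume to_split doesn't include space
--     tokens = to_split.split(punc)
--     to_return = []
--     if tokens[0]:
--         to_return.append(tokens[0])
--     for token in tokens[1:]:
--         to_return.append(punc)
--         to_return.append(token)
--     if not tokens[-1]:
--         return to_return[:-1]
--     return to_return
-- ===== SOURCE B (Python) =====
-- import re
--
-- def __split_with_punctuation(to_split, punc):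
--     # re.split with a captured literal group keeps each delimiter as its own token;
--     # then trim the single leading/trailing empty piece.
--     parts = re.split('(' + re.escape(punc) + ')', to_split)
--     if parts and parts[0] == '':
--         parts.pop(0)
--     if parts and parts[-1] == '':
--         parts.pop()
--     return parts
-- ===== Notes on version B (the rewrite author's own statement) =====
-- stated objective: idiomatic
-- what changed: Replaces the split-then-interleave loop with one re.split on a captured literal group (which keeps each delimiter as a token) followed by trimming the single leading/trailing empty piece.
-- outside the precondition, e.g. on __split_with_punctuation('ab', ''): A raises ValueError, B returns ['', 'a', '', 'b', '']
import Mathlib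
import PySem

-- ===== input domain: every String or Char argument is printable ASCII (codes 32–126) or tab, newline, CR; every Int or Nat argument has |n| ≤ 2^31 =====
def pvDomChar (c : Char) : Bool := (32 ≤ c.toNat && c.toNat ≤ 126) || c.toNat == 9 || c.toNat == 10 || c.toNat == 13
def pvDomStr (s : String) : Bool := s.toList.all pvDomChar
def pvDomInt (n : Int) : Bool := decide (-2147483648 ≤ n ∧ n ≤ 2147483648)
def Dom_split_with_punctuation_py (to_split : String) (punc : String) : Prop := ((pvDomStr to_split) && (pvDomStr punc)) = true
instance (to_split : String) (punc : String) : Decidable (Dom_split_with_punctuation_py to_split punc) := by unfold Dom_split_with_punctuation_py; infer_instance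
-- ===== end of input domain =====

-- B replaces A's split-then-interleave loop by one delimiter-keeping split (re.split on a
-- captured literal group) followed by trimming the single leading/trailing empty piece (idiomatic).


-- ===== PORT A =====
def split_with_punctuation_py (to_split : String) (punc : String) : List String :=
  match PySem.Str.split? to_split punc with
  | none => []   -- punc = "": Python's str.split raises ValueError; excluded by Pre_
  | some tokens =>
    -- if tokens[0]: to_return.append(tokens[0])
    let to_return : List String :=
      if ((PySem.List.pyGet? tokens 0).getD "") ≠ "" then [(PySem.List.pyGet? tokens 0).getD ""] else []
    -- for token in tokens[1:]: to_return.append(punc); to_return.append(token)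
    let to_return := (PySem.List.slice tokens (some 1) none).foldl
      (fun acc token => (acc ++ [punc]) ++ [token]) to_return
    -- if not tokens[-1]: return to_return[:-1]
    if ((PySem.List.pyGet? tokens (-1)).getD "") = "" then
      PySem.List.slice to_return none (some (-1))
    else to_return

-- ===== PORT B =====
-- model of re.split('(' + re.escape(punc) + ')', s): the pieces between the non-overlapping
-- occurrences of the literal punc, with each occurrence kept as its own token in between;
-- exact for punc ≠ "" (punc = "" is outside Pre_).
def reSplitKeep (to_split : String) (punc : String) : List String :=
  match PySem.Str.split? to_split punc with
  | none => []
  | some tokens => List.intersperse punc tokens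

def split_with_punctuation_py_alt (to_split : String) (punc : String) : List String :=
  let parts := reSplitKeep to_split punc
  -- if parts and parts[0] == '': parts.pop(0)
  let parts := if parts.head? = some "" then parts.tail else parts
  -- if parts and parts[-1] == '': parts.pop()
  if parts.getLast? = some "" then parts.dropLast else parts

-- ===== PRECONDITION & SPEC =====
-- Pre_ excludes exactly punc = "", on which A's str.split raises ValueError.
def Pre_split_with_punctuation_py (to_split : String) (punc : String) : Prop := punc ≠ ""
instance (to_split : String) (punc : String) : Decidable (Pre_split_with_punctuation_py to_split punc) := by unfold Pre_split_with_punctuation_py; infer_instance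
def pvWitness_split_with_punctuation_py : String × String := ("a/b/", "/")

def Spec_split_with_punctuation_py (to_split : String) (punc : String) (out : List String) : Prop := out = split_with_punctuation_py_alt to_split punc
instance (to_split : String) (punc : String) (out : List String) : Decidable (Spec_split_with_punctuation_py to_split punc out) := by unfold Spec_split_with_punctuation_py; infer_instance

-- ===== CLAIM (what is proved, stated in full; the proofs are below) =====
def Claim_equal_split_with_punctuation_py : Prop := ∀ (to_split : String) (punc : String), Dom_split_with_punctuation_py to_split punc → Pre_split_with_punctuation_py to_split punc → Spec_split_with_punctuation_py to_split punc (split_with_punctuation_py to_split punc)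

-- ===== LEMMAS AND PROOFS =====

-- intersperse as a flatMap behind the head
lemma intersperse_eq_flat (p t0 : String) (ts : List String) :
    List.intersperse p (t0 :: ts) = t0 :: ts.flatMap (fun t => [p, t]) := by
  induction ts generalizing t0 with
  | nil => simp
  | cons t1 ts ih => simp [List.intersperse, ih t1]

-- the last element of the interleaving is the last token
lemma getLast?_flat (p : String) (ts : List String) (h : ts ≠ []) :
    (ts.flatMap (fun t => [p, t])).getLast? = ts.getLast? := by
  induction ts with
  | nil => simp at h
  | cons t ts ih =>
    cases ts with
    | nil => simp
    | cons t1 ts1 =>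
      have hsplit : ((t :: t1 :: ts1).flatMap (fun t => [p, t]))
           = [p, t] ++ ((t1 :: ts1).flatMap (fun t => [p, t])) := by simp
      rw [hsplit, List.getLast?_append, ih (by simp)]
      cases hg : (t1 :: ts1).getLast? with
      | none => simp [List.getLast?_eq_none_iff] at hg
      | some x => exact hg.symm

-- both trimming policies agree once at least one separator occurred
lemma trim_eq (punc t0 : String) (ts : List String) (hts : ts ≠ []) :
    (if ((t0 :: ts).getLast?.getD "") = "" then
        ((if t0 ≠ "" then [t0] else []) ++ ts.flatMap (fun t => [punc, t])).dropLast
      else (if t0 ≠ "" then [t0] else []) ++ ts.flatMap (fun t => [punc, t]))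
    =
    (let parts := t0 :: ts.flatMap (fun t => [punc, t])
     let parts := if parts.head? = some "" then parts.tail else parts
     if parts.getLast? = some "" then parts.dropLast else parts) := by
  obtain ⟨x, hx⟩ : ∃ x, ts.getLast? = some x := by
    cases hg : ts.getLast? with
    | none => simp [List.getLast?_eq_none_iff] at hg; exact absurd hg hts
    | some x => exact ⟨x, rfl⟩
  have hLlast : (ts.flatMap (fun t => [punc, t])).getLast? = some x := by
    rw [getLast?_flat punc ts hts, hx]
  have hLne : ts.flatMap (fun t => [punc, t]) ≠ [] := by
    intro h; rw [h] at hLlast; simp at hLlast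
  have htok : (t0 :: ts).getLast? = some x := by
    cases ts with
    | nil => exact absurd rfl hts
    | cons a l => rw [List.getLast?_cons_cons, hx]
  have hcons : (t0 :: ts.flatMap (fun t => [punc, t])).getLast? = some x := by
    cases hL : ts.flatMap (fun t => [punc, t]) with
    | nil => exact absurd hL hLne
    | cons b l => rw [List.getLast?_cons_cons, ← hL, hLlast]
  generalize ts.flatMap (fun t => [punc, t]) = L at hLlast hLne hcons
  simp only [htok, Option.getD_some, List.head?_cons]
  by_cases h0 : t0 = ""
  · subst h0
    rw [if_pos rfl, List.tail_cons, hLlast]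
    by_cases hxe : x = "" <;> simp [hxe]
  · have hne2 : ¬ (some t0 = some ("" : String)) := by simpa using h0
    rw [if_neg hne2, hcons]
    by_cases hxe : x = "" <;> simp [hxe, h0]

-- the core: A's interleave-then-trim equals trim (intersperse punc tokens)
lemma core (punc : String) (tokens : List String) :
    (let to_return : List String :=
      if ((PySem.List.pyGet? tokens 0).getD "") ≠ "" then [(PySem.List.pyGet? tokens 0).getD ""] else []
     let to_return := (PySem.List.slice tokens (some 1) none).foldl
       (fun acc token => (acc ++ [punc]) ++ [token]) to_return
     if ((PySem.List.pyGet? tokens (-1)).getD "") = "" then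
       PySem.List.slice to_return none (some (-1))
     else to_return)
    =
    (let parts := List.intersperse punc tokens
     let parts := if parts.head? = some "" then parts.tail else parts
     if parts.getLast? = some "" then parts.dropLast else parts) := by
  cases tokens with
  | nil =>
    have h1 : PySem.List.slice ([] : List String) (some 1) none = [] := by
      simpa using PySem.List.slice_from ([] : List String) (a := 1) (by norm_num)
    simp [PySem.List.pyGet?, PySem.List.pyIdx?, PySem.List.slice_to_neg_one, h1]
  | cons t0 ts =>
    have hget0 : PySem.List.pyGet? (t0 :: ts) (0 : Int) = some t0 := by
      simpa using PySem.List.pyGet?_natCast (t0 :: ts) 0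
    have htail : PySem.List.slice (t0 :: ts) (some 1) none = ts := by
      simpa using PySem.List.slice_from (t0 :: ts) (a := 1) (by norm_num)
    have hfold : ∀ init : List String,
        ts.foldl (fun acc token => (acc ++ [punc]) ++ [token]) init
        = init ++ ts.flatMap (fun t => [punc, t]) := by
      intro init
      have := PySem.List.foldl_append_eq_flatMap (g := fun t => [punc, t]) ts init
      simpa [List.append_assoc] using this
    have hlast : PySem.List.pyGet? (t0 :: ts) (-1 : Int) = (t0 :: ts).getLast? := by
      simp [PySem.List.pyGet?, PySem.List.pyIdx?, List.getLast?_eq_getElem?]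
    cases ts with
    | nil =>
      by_cases h0 : t0 = ""
      · subst h0
        simp [htail, hlast, PySem.List.slice_to_neg_one, List.intersperse]
      · simp [hget0, htail, hlast, h0, List.intersperse]
    | cons t1 ts1 =>
      simp only [hget0, htail, hfold, hlast, PySem.List.slice_to_neg_one,
        intersperse_eq_flat, Option.getD_some]
      exact trim_eq punc t0 (t1 :: ts1) (by simp)

-- ===== VERDICT (by name: the statement is the Claim_ definition above) =====
theorem split_with_punctuation_py_spec : Claim_equal_split_with_punctuation_py := by
  intro to_split punc _ _
  unfold Spec_split_with_punctuation_py split_with_punctuation_py split_with_punctuation_py_alt reSplitKeep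
  cases PySem.Str.split? to_split punc with
  | none => simp
  | some tokens => simpa using core punc tokens
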